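-- pv_equiv track=rewrite | github.com/Vijay11-08/All-In-One-Directory | One Pattern/Star Number Patterns/print_patterns.py | square_hollow
-- ===== SOURCE A (Python) =====
-- def square_hollow(n: int) -> str:
--     lines: list[str] = []
--     for i in range(1, n + 1):
--         if i == 1 or i == n:
--             lines.append("*" * n)
--         else:
--             lines.append("*" + " " * (n - 2) + "*")
--     return "\n".join(lines)
-- ===== SOURCE B (Python) =====
-- def square_hollow(n: int) -> str:
--     # Flat-buffer algorithm: start from an all-star byte grid of width n+1
--     # (rows + newline column), then punch in the newline column with one strided
--     # slice assignment and blank out each interior row span by slice assignment.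
--     if n <= 0:
--         return ""
--     w = n + 1
--     grid = bytearray(b"*" * (n * w - 1))
--     grid[n::w] = b"\n" * (n - 1)
--     for r in range(1, n - 1):
--         grid[r * w + 1:r * w + n - 1] = b" " * (n - 2)
--     return grid.decode()
-- ===== Notes on version B (the rewrite author's own statement) =====
-- stated objective: alternative
-- what changed: Replaced A's row-by-row construction (loop over row indices, branch border/interior per row, join the row strings with newlines) by a flat-buffer algorithm: allocate one all-star byte buffer of the whole picture, punch in the newline column with a single strided slice assignment, and blank each interior row span by slice assignment into the buffer.
import Mathlib
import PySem

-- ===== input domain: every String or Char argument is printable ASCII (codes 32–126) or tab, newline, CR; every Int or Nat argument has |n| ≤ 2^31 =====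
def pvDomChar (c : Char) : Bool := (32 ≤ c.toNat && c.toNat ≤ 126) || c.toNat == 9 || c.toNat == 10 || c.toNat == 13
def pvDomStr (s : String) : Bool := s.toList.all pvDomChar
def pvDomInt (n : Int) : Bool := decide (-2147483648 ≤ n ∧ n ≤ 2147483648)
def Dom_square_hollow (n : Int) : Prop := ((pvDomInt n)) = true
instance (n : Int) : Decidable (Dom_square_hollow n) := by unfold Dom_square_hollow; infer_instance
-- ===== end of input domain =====

-- B replaces A's row-by-row construction (branch per row, join with newlines) by a flat all-star
-- character buffer mutated in place: one strided assignment punches the newline column, slice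
-- assignments blank each interior row span; objective: alternative (different algorithm).

-- ===== PORT A =====
-- "*" * k  (Python string repetition; "" for k ≤ 0, matched by Int.toNat's clamp)
def pvStars (k : Int) : String := String.ofList (List.replicate k.toNat '*')

def square_hollow (n : Int) : String :=
  PySem.Str.join "\n"
    ((PySem.List.pyRange 1 (n + 1) 1).map (fun i =>
      if i == 1 || i == n then pvStars n
      else String.ofList ('*' :: (List.replicate (n - 2).toNat ' ' ++ ['*']))))

-- ===== PORT B =====
-- Python  g[a:b] = xs  — exact for 0 ≤ a ≤ b ≤ len g with len xs = b - a (the only case B reaches)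
def pvSetSlice (g : List Char) (a b : Nat) (xs : List Char) : List Char :=
  g.take a ++ xs ++ g.drop b

-- Python  g[a::step] = xs  — exact when len xs equals the number of stride positions (B's only use)
def pvSetStride (g : List Char) (a step : Nat) (xs : List Char) : List Char :=
  match xs with
  | [] => g
  | x :: rest => pvSetStride (g.set a x) (a + step) step rest

-- the final "".join over single-character buffer slots is String.ofList of the char buffer
def square_hollow_alt (n : Int) : String :=
  if n ≤ 0 then ""
  else
    String.ofList
      ((PySem.List.pyRange 1 (n - 1) 1).foldl
        (fun g r => pvSetSlice g (r * (n + 1) + 1).toNat (r * (n + 1) + n - 1).toNat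
          (List.replicate (n - 2).toNat ' '))
        (pvSetStride (List.replicate (n * (n + 1) - 1).toNat '*') n.toNat (n + 1).toNat
          (List.replicate (n - 1).toNat '\n')))

-- ===== PRECONDITION & SPEC =====
def Spec_square_hollow (n : Int) (out : String) : Prop := out = square_hollow_alt n
instance (n : Int) (out : String) : Decidable (Spec_square_hollow n out) := by unfold Spec_square_hollow; infer_instance

-- ===== CLAIM (what is proved, stated in full; the proofs are below) =====
def Claim_equal_square_hollow : Prop := ∀ (n : Int), Dom_square_hollow n → Spec_square_hollow n (square_hollow n)

-- ===== LEMMAS AND PROOFS =====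

-- "\n".join of  interiors ++ [last]  on the char-list side
theorem pv_join_aux (itrL last : List Char) (j : Nat) :
    PySem.Chars.join ['\n'] (List.replicate j itrL ++ [last])
      = (List.replicate j (itrL ++ ['\n'])).flatten ++ last := by
  induction j with
  | zero => simp [PySem.Chars.join_singleton]
  | succ j ih =>
    rw [List.replicate_succ, List.cons_append]
    obtain ⟨q, rest, he⟩ : ∃ q rest, List.replicate j itrL ++ [last] = q :: rest := by
      cases j <;> simp [List.replicate_succ]
    rw [he, PySem.Chars.join_cons_cons, ← he, ih]
    simp [List.replicate_succ, List.append_assoc]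

theorem pv_join (bL itrL : List Char) (j : Nat) :
    PySem.Chars.join ['\n'] (bL :: (List.replicate j itrL ++ [bL]))
      = bL ++ '\n' :: ((List.replicate j (itrL ++ ['\n'])).flatten ++ bL) := by
  obtain ⟨q, rest, he⟩ : ∃ q rest, List.replicate j itrL ++ [bL] = q :: rest := by
    cases j <;> simp [List.replicate_succ]
  rw [he, PySem.Chars.join_cons_cons, ← he, pv_join_aux]
  simp

-- A's middle rows 2..n-1 all produce the interior row string
theorem pv_mid_map (n : Int) :
    (PySem.List.pyRange 2 n 1).map (fun i =>
        if i == 1 || i == n then pvStars n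
        else String.ofList ('*' :: (List.replicate (n - 2).toNat ' ' ++ ['*'])))
      = List.replicate (n - 2).toNat
          (String.ofList ('*' :: (List.replicate (n - 2).toNat ' ' ++ ['*']))) := by
  have h : ∀ i ∈ PySem.List.pyRange 2 n 1,
      (if i == 1 || i == n then pvStars n
       else String.ofList ('*' :: (List.replicate (n - 2).toNat ' ' ++ ['*'])))
        = String.ofList ('*' :: (List.replicate (n - 2).toNat ' ' ++ ['*'])) := by
    intro i hi
    rw [PySem.List.mem_pyRange_one] at hi
    have h1 : (i == 1) = false := by simp; omega
    have h2 : (i == n) = false := by simp; omega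
    simp [h1, h2]
  rw [List.map_congr_left h, List.map_const']
  rw [PySem.List.length_pyRange_one]

-- A's characters, for n ≥ 2
theorem pv_A_chars (m : Nat) (hm : 2 ≤ m) :
    (square_hollow (m : Int)).toList
      = List.replicate m '*' ++ '\n' ::
        ((List.replicate (m - 2) (('*' :: (List.replicate (m - 2) ' ' ++ ['*'])) ++ ['\n'])).flatten
          ++ List.replicate m '*') := by
  unfold square_hollow
  have hn2 : (2 : Int) ≤ (m : Int) := by omega
  have hcons : PySem.List.pyRange 1 ((m : Int) + 1) 1 = 1 :: PySem.List.pyRange 2 ((m : Int) + 1) 1 := by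
    have := PySem.List.pyRange_one_cons (a := 1) (b := (m : Int) + 1) (by omega)
    simpa using this
  have hsucc : PySem.List.pyRange 2 ((m : Int) + 1) 1
      = PySem.List.pyRange 2 (m : Int) 1 ++ [(m : Int)] := PySem.List.pyRange_one_succ_right hn2
  rw [hcons, hsucc, List.map_cons, List.map_append, pv_mid_map]
  have h1 : ((1 : Int) == 1 || (1 : Int) == (m : Int)) = true := by simp
  have hmm : ((m : Int) == 1 || (m : Int) == (m : Int)) = true := by simp
  rw [if_pos h1]
  simp only [List.map_cons, List.map_nil, hmm, if_pos]
  rw [PySem.Str.toList_join]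
  have htn : ((m : Int) - 2).toNat = m - 2 := by omega
  have hstars : (pvStars (m : Int)).toList = List.replicate m '*' := by
    simp [pvStars]
  simp only [List.map_cons, List.map_append, List.map_replicate, List.map_nil, hstars, htn]
  have hitr : (String.ofList ('*' :: (List.replicate (m - 2) ' ' ++ ['*']))).toList
      = '*' :: (List.replicate (m - 2) ' ' ++ ['*']) := by simp
  rw [hitr]
  have hsep : ("\n" : String).toList = ['\n'] := by decide
  rw [hsep, pv_join]

-- strided assignment leaves a fixed prefix untouched
theorem pv_stride_prepend (xs : List Char) : ∀ (a step : Nat) (p g : List Char),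
    pvSetStride (p ++ g) (p.length + a) step xs = p ++ pvSetStride g a step xs := by
  induction xs with
  | nil => intro a step p g; rfl
  | cons x rest ih =>
    intro a step p g
    show pvSetStride ((p ++ g).set (p.length + a) x) (p.length + a + step) step rest = _
    rw [List.set_append]
    have h : ¬ (p.length + a < p.length) := by omega
    rw [if_neg h]
    have h2 : p.length + a - p.length = a := by omega
    have h3 : p.length + a + step = p.length + (a + step) := by omega
    rw [h2, h3, ih]
    rfl

-- punching the newline column into the all-star buffer yields stars rows separated by newlines
theorem pv_stride_stars (m : Nat) (j : Nat) :
    pvSetStride (List.replicate (j * (m + 1) + m) '*') m (m + 1) (List.replicate j '\n')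
      = (List.replicate j (List.replicate m '*' ++ ['\n'])).flatten ++ List.replicate m '*' := by
  induction j with
  | zero => simp [pvSetStride]
  | succ j ih =>
    have e1 : List.replicate ((j + 1) * (m + 1) + m) '*'
        = List.replicate m '*' ++ '*' :: List.replicate (j * (m + 1) + m) '*' := by
      rw [show (j + 1) * (m + 1) + m = m + ((j * (m + 1) + m) + 1) from by ring,
        List.replicate_add, List.replicate_succ]
    have e2 : List.replicate (j + 1) '\n' = '\n' :: List.replicate j '\n' := by
      rw [List.replicate_succ]
    rw [e1, e2]
    show pvSetStride ((List.replicate m '*' ++ '*' :: List.replicate (j * (m + 1) + m) '*').set m '\n')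
      (m + (m + 1)) (m + 1) (List.replicate j '\n') = _
    have hset : (List.replicate m '*' ++ '*' :: List.replicate (j * (m + 1) + m) '*').set m '\n'
        = (List.replicate m '*' ++ ['\n']) ++ List.replicate (j * (m + 1) + m) '*' := by
      rw [List.set_append]
      simp
    have hstart : m + (m + 1) = (List.replicate m '*' ++ ['\n']).length + m := by simp; omega
    rw [hset, hstart, pv_stride_prepend, ih]
    simp [List.replicate_succ, List.append_assoc]

-- the buffer after the interior rows 1..j have been blanked
def pvStage (m j : Nat) : List Char :=
  (List.replicate m '*' ++ ['\n'])
    ++ ((List.replicate j (('*' :: (List.replicate (m - 2) ' ' ++ ['*'])) ++ ['\n'])).flatten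
      ++ ((List.replicate (m - 2 - j) (List.replicate m '*' ++ ['\n'])).flatten
        ++ List.replicate m '*'))

-- one slice assignment blanks the next interior row
theorem pv_slice_step (m j : Nat) (hm : 2 ≤ m) (hj : j < m - 2) :
    pvSetSlice (pvStage m j) ((j + 1) * (m + 1) + 1) ((j + 1) * (m + 1) + (m - 1))
      (List.replicate (m - 2) ' ') = pvStage m (j + 1) := by
  have hstage : pvStage m j
      = ((List.replicate m '*' ++ ['\n'])
          ++ (List.replicate j (('*' :: (List.replicate (m - 2) ' ' ++ ['*'])) ++ ['\n'])).flatten)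
        ++ (List.replicate m '*' ++ '\n' ::
            ((List.replicate (m - 2 - j - 1) (List.replicate m '*' ++ ['\n'])).flatten
              ++ List.replicate m '*')) := by
    unfold pvStage
    rw [show m - 2 - j = (m - 2 - j - 1) + 1 from by omega, List.replicate_succ]
    simp [List.append_assoc]
  have hP : ((List.replicate m '*' ++ ['\n'])
      ++ (List.replicate j (('*' :: (List.replicate (m - 2) ' ' ++ ['*'])) ++ ['\n'])).flatten).length
        = (j + 1) * (m + 1) := by
    have hX : (('*' :: (List.replicate (m - 2) ' ' ++ ['*'])) ++ ['\n']).length = m + 1 := by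
      simp
      omega
    rw [List.length_append, List.length_flatten, List.map_replicate, List.sum_replicate, hX]
    simp only [smul_eq_mul, List.length_append, List.length_replicate, List.length_cons,
      List.length_nil]
    ring
  unfold pvSetSlice
  rw [hstage, show (j + 1) * (m + 1) + 1
      = ((List.replicate m '*' ++ ['\n'])
          ++ (List.replicate j (('*' :: (List.replicate (m - 2) ' ' ++ ['*'])) ++ ['\n'])).flatten).length + 1
      from by rw [hP],
    show (j + 1) * (m + 1) + (m - 1)
      = ((List.replicate m '*' ++ ['\n'])
          ++ (List.replicate j (('*' :: (List.replicate (m - 2) ' ' ++ ['*'])) ++ ['\n'])).flatten).length + (m - 1)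
      from by rw [hP],
    List.take_length_add_append, List.drop_length_add_append]
  have htake : (List.replicate m '*' ++ '\n' ::
      ((List.replicate (m - 2 - j - 1) (List.replicate m '*' ++ ['\n'])).flatten
        ++ List.replicate m '*')).take 1 = ['*'] := by
    rw [show m = (m - 1) + 1 from by omega, List.replicate_succ]
    simp
  have hdrop : (List.replicate m '*' ++ '\n' ::
      ((List.replicate (m - 2 - j - 1) (List.replicate m '*' ++ ['\n'])).flatten
        ++ List.replicate m '*')).drop (m - 1)
      = '*' :: '\n' ::
        ((List.replicate (m - 2 - j - 1) (List.replicate m '*' ++ ['\n'])).flatten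
          ++ List.replicate m '*') := by
    rw [List.drop_append_of_le_length (by simp), List.drop_replicate,
      show m - (m - 1) = 1 from by omega]
    simp
  rw [htake, hdrop]
  unfold pvStage
  rw [show m - 2 - (j + 1) = m - 2 - j - 1 from by omega, List.replicate_succ',
    List.flatten_append]
  simp [List.append_assoc]

-- the whole interior loop, row by row
theorem pv_fold_slices (m : Nat) (hm : 2 ≤ m) : ∀ j, j ≤ m - 2 →
    (List.range j).foldl
      (fun g k => pvSetSlice g ((k + 1) * (m + 1) + 1) ((k + 1) * (m + 1) + (m - 1))
        (List.replicate (m - 2) ' '))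
      (pvStage m 0) = pvStage m j := by
  intro j
  induction j with
  | zero => intro _; rfl
  | succ j ih =>
    intro hj
    rw [List.range_succ, List.foldl_append, ih (by omega)]
    simp only [List.foldl_cons, List.foldl_nil]
    exact pv_slice_step m j hm (by omega)

-- B's characters, for n ≥ 2
theorem pv_B_chars (m : Nat) (hm : 2 ≤ m) :
    (square_hollow_alt (m : Int)).toList
      = List.replicate m '*' ++ '\n' ::
        ((List.replicate (m - 2) (('*' :: (List.replicate (m - 2) ' ' ++ ['*'])) ++ ['\n'])).flatten
          ++ List.replicate m '*') := by
  unfold square_hollow_alt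
  rw [if_neg (show ¬ ((m : Int) ≤ 0) from by omega)]
  -- numeric conversions
  have hg0 : ((m : Int) * ((m : Int) + 1) - 1).toNat = (m - 1) * (m + 1) + m := by
    have h1 : (m : Int) * ((m : Int) + 1) = ((m * (m + 1) : Nat) : Int) := by push_cast; ring
    have h2 : m * (m + 1) = (m - 1) * (m + 1) + m + 1 := by
      obtain ⟨t, rfl⟩ : ∃ t, m = t + 1 := ⟨m - 1, by omega⟩
      have e1 : (t + 1) * (t + 1 + 1) = t * t + 3 * t + 2 := by ring
      have e2 : (t + 1 - 1) * (t + 1 + 1) = t * t + 2 * t := by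
        rw [show t + 1 - 1 = t from rfl]; ring
      omega
    omega
  have hmt : (m : Int).toNat = m := by omega
  have hwt : ((m : Int) + 1).toNat = m + 1 := by omega
  have hn1 : ((m : Int) - 1).toNat = m - 1 := by omega
  have hn2 : ((m : Int) - 2).toNat = m - 2 := by omega
  rw [hg0, hmt, hwt, hn1, hn2, pv_stride_stars]
  -- the star rows separated by newlines are stage 0
  have hstage0 : (List.replicate (m - 1) (List.replicate m '*' ++ ['\n'])).flatten
      ++ List.replicate m '*' = pvStage m 0 := by
    rw [show m - 1 = (m - 2) + 1 from by omega, List.replicate_succ]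
    simp [pvStage, List.append_assoc]
  rw [hstage0]
  -- the interior loop over Int indices is the Nat-indexed loop
  rw [PySem.List.pyRange_one, show ((m : Int) - 1 - 1).toNat = m - 2 from by omega, List.foldl_map]
  have hfun : (fun (g : List Char) (k : Nat) => pvSetSlice g
        ((1 + (k : Int)) * ((m : Int) + 1) + 1).toNat
        ((1 + (k : Int)) * ((m : Int) + 1) + (m : Int) - 1).toNat
        (List.replicate (m - 2) ' '))
      = (fun (g : List Char) (k : Nat) => pvSetSlice g ((k + 1) * (m + 1) + 1)
          ((k + 1) * (m + 1) + (m - 1)) (List.replicate (m - 2) ' ')) := by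
    funext g k
    have ha : (1 + (k : Int)) * ((m : Int) + 1) + 1 = (((k + 1) * (m + 1) + 1 : Nat) : Int) := by
      push_cast; ring
    have hb : (1 + (k : Int)) * ((m : Int) + 1) + (m : Int) - 1
        = (((k + 1) * (m + 1) + (m - 1) : Nat) : Int) := by
      push_cast [Nat.cast_sub (show 1 ≤ m from by omega)]; ring
    rw [ha, hb, Int.toNat_natCast, Int.toNat_natCast]
  rw [hfun, pv_fold_slices m hm (m - 2) (le_refl _)]
  -- stage m-2 is the hollow square
  rw [show (String.ofList (pvStage m (m - 2))).toList = pvStage m (m - 2) from by simp]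
  unfold pvStage
  rw [show m - 2 - (m - 2) = 0 from by omega]
  simp

-- ===== VERDICT (by name: the statement is the Claim_ definition above) =====
theorem square_hollow_spec : Claim_equal_square_hollow := by
  intro n _
  unfold Spec_square_hollow
  by_cases h0 : n ≤ 0
  · unfold square_hollow square_hollow_alt
    rw [PySem.List.pyRange_one_eq_nil (by omega), if_pos h0]
    simp [PySem.Str.join, PySem.Chars.join, List.intercalate]
  · by_cases h1 : n = 1
    · subst h1; decide
    · obtain ⟨m, rfl⟩ : ∃ m : Nat, n = (m : Int) := ⟨n.toNat, by omega⟩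
      have hm : 2 ≤ m := by omega
      apply String.toList_inj.mp
      rw [pv_A_chars m hm, pv_B_chars m hm]
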